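-- pv_equiv track=rewrite | github.com/nunorgcarvalho/popstatgensim | src/popstatgensim/pedigree/pedigree.py | extract_signatures
-- ===== SOURCE A (Python) =====
-- from collections import namedtuple
-- from typing import Dict, List, Optional, Tuple
--
-- PedPath = Tuple[int, ...] # stores chain of meioses up/down, modified from [Williams et al. 2025 Genetics]
--
-- PathSig = namedtuple('PathSig', ['ups', 'downs', 'up_first','up_last', 'up3s', 'down3s']) # signature of a path for hashing
--
-- def extract_signatures(path: PedPath) -> PathSig:
--     '''
--     Extracts a signature from a PedPath for hashing purposes. The signature consists of the number of ups, number of downs, whether the first step is up or down, and whether the last step is up or down.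
--     Parameters:
--         path (PedPath): The path to extract the signature from.
--     Returns:
--         PathSig: The signature of the path.
--     '''
--     positives = [step for step in path if step > 0]
--     negatives = [step for step in path if step < 0]
--     # extract number of up meioses (i.e. positive entries)
--     ups = len(positives)
--     # extract number of down meioses (i.e. negative entries)
--     downs = len(negatives)
--     # extract the value of the first positive step
--     up_first = positives[0] if ups > 0 else -9
--     # extract the value of the last positive step
--     up_last = positives[-1] if ups > 0 else -9
--
--     # extract number of +3s and -3s
--     up3s = positives.count(3)
--     down3s = negatives.count(-3)
--
--     # returns PathSig namedtuple
--     return PathSig(ups=ups, downs=downs, up_first=up_first, up_last=up_last, up3s=up3s, down3s=down3s)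
-- ===== SOURCE B (Python) =====
-- from collections import namedtuple
--
-- PathSig = namedtuple('PathSig', ['ups', 'downs', 'up_first', 'up_last', 'up3s', 'down3s'])
--
-- def extract_signatures(path):
--     ups = downs = up3s = down3s = 0
--     up_first = up_last = -9
--     for step in path:
--         if step > 0:
--             ups += 1
--             if ups == 1:
--                 up_first = step
--             up_last = step
--             if step == 3:
--                 up3s += 1
--         elif step < 0:
--             downs += 1
--             if step == -3:
--                 down3s += 1
--     return PathSig(ups=ups, downs=downs, up_first=up_first, up_last=up_last,
--                    up3s=up3s, down3s=down3s)
-- ===== Notes on version B (the rewrite author's own statement) =====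
-- stated objective: faster
-- what changed: Replaced the two filter comprehensions plus separate len/index/count passes by a single fused scan maintaining six accumulators, building no intermediate lists.
import Mathlib
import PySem

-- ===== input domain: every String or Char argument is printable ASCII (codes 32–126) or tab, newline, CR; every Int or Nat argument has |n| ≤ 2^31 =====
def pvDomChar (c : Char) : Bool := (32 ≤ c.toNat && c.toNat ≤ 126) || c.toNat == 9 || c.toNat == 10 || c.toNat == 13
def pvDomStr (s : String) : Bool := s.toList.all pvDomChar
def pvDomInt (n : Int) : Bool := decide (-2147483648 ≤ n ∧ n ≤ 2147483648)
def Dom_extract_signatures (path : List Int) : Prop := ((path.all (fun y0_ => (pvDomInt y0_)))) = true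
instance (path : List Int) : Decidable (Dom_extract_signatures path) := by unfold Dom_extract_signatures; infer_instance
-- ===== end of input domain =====

-- B fuses A's two filter comprehensions and the separate len/index/count passes
-- into one scan with six accumulators (constant-factor speedup, no temporary lists).

-- ===== PORT A =====
def extract_signatures (path : List Int) : Int × Int × Int × Int × Int × Int :=
  let positives := path.filter (fun step => step > 0)
  let negatives := path.filter (fun step => step < 0)
  let ups : Int := positives.length
  let downs : Int := negatives.length
  let up_first : Int := if ups > 0 then (PySem.List.pyGet? positives 0).getD (-9) else -9
  let up_last : Int := if ups > 0 then (PySem.List.pyGet? positives (-1)).getD (-9) else -9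
  let up3s : Int := positives.count 3
  let down3s : Int := negatives.count (-3)
  (ups, downs, up_first, up_last, up3s, down3s)

-- ===== PORT B =====
-- one loop-body step of B's single scan over the path
def esStep (s : Int × Int × Int × Int × Int × Int) (step : Int) :
    Int × Int × Int × Int × Int × Int :=
  if step > 0 then
    let ups := s.1 + 1
    (ups, s.2.1, if ups = 1 then step else s.2.2.1, step,
     if step = 3 then s.2.2.2.2.1 + 1 else s.2.2.2.2.1, s.2.2.2.2.2)
  else if step < 0 then
    (s.1, s.2.1 + 1, s.2.2.1, s.2.2.2.1, s.2.2.2.2.1,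
     if step = -3 then s.2.2.2.2.2 + 1 else s.2.2.2.2.2)
  else s

def extract_signatures_alt (path : List Int) : Int × Int × Int × Int × Int × Int :=
  path.foldl esStep (0, 0, -9, -9, 0, 0)

-- ===== PRECONDITION & SPEC =====
def Spec_extract_signatures (path : List Int) (out : Int × Int × Int × Int × Int × Int) : Prop := out = extract_signatures_alt path
instance (path : List Int) (out : Int × Int × Int × Int × Int × Int) : Decidable (Spec_extract_signatures path out) := by unfold Spec_extract_signatures; infer_instance

-- ===== CLAIM (what is proved, stated in full; the proofs are below) =====
def Claim_equal_extract_signatures : Prop := ∀ (path : List Int), Dom_extract_signatures path → Spec_extract_signatures path (extract_signatures path)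

-- ===== LEMMAS AND PROOFS =====

-- invariant of B's scan: the fold from any state with nonnegative `u` is fully
-- characterised by the positive/negative sublists of the remaining input
theorem esStep_fold (l : List Int) : ∀ (u d uf ul u3 d3 : Int), 0 ≤ u →
    l.foldl esStep (u, d, uf, ul, u3, d3) =
      (u + (l.filter (fun s => s > 0)).length,
       d + (l.filter (fun s => s < 0)).length,
       if u = 0 then ((l.filter (fun s => s > 0)).head?).getD uf else uf,
       ((l.filter (fun s => s > 0)).getLast?).getD ul,
       u3 + (l.filter (fun s => s > 0)).count 3,
       d3 + (l.filter (fun s => s < 0)).count (-3)) := by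
  induction l with
  | nil => intro u d uf ul u3 d3 hu; simp
  | cons x xs ih =>
    intro u d uf ul u3 d3 hu
    by_cases hp : x > 0
    · have hx' : ¬ x < 0 := by omega
      rw [List.foldl_cons]
      have hstep : esStep (u, d, uf, ul, u3, d3) x =
          (u + 1, d, if u + 1 = 1 then x else uf, x,
           if x = 3 then u3 + 1 else u3, d3) := by
        simp [esStep, hp]
      rw [hstep, ih (u + 1) d _ x _ d3 (by omega)]
      have hne : ¬ (u + 1 = 0) := by omega
      simp only [List.filter_cons, hp, hx', decide_true, decide_false, if_true,
        List.length_cons, List.count_cons, if_neg hne]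
      refine Prod.ext ?_ (Prod.ext rfl (Prod.ext ?_ (Prod.ext ?_ (Prod.ext ?_ rfl))))
      · push_cast; ring
      · by_cases h0 : u = 0
        · simp [h0]
        · have h1 : ¬ (u + 1 = 1) := by omega
          simp [h0, h1]
      · generalize List.filter (fun s => decide (s > 0)) xs = F
        cases F <;> simp [List.getLast?_cons]
      · by_cases hx3 : x = 3 <;> simp [hx3] <;> ring
    · by_cases hn : x < 0
      · rw [List.foldl_cons]
        have hstep : esStep (u, d, uf, ul, u3, d3) x =
            (u, d + 1, uf, ul, u3, if x = -3 then d3 + 1 else d3) := by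
          simp [esStep, hp, hn]
        rw [hstep, ih u (d + 1) uf ul u3 _ hu]
        simp only [List.filter_cons, hp, hn, decide_true, decide_false, if_true,
          List.length_cons, List.count_cons]
        refine Prod.ext rfl (Prod.ext ?_ (Prod.ext rfl (Prod.ext rfl (Prod.ext rfl ?_))))
        · push_cast; ring
        · by_cases hx3 : x = -3 <;> simp [hx3] <;> ring
      · rw [List.foldl_cons]
        have hstep : esStep (u, d, uf, ul, u3, d3) x = (u, d, uf, ul, u3, d3) := by
          simp [esStep, hp, hn]
        rw [hstep, ih u d uf ul u3 d3 hu]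
        simp [hp, hn]

-- ===== VERDICT (by name: the statement is the Claim_ definition above) =====
theorem extract_signatures_spec : Claim_equal_extract_signatures := by
  intro path _
  unfold Spec_extract_signatures extract_signatures extract_signatures_alt
  rw [esStep_fold path 0 0 (-9) (-9) 0 0 (le_refl 0)]
  cases path.filter (fun step => step > 0) with
  | nil => simp
  | cons y ys =>
      have h1 : PySem.List.pyGet? (y :: ys) (-1) = (y :: ys).getLast? :=
        PySem.List.pyGet?_neg_one (y :: ys)
      simp [h1]
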